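-- pv_equiv track=rewrite | github.com/ldp2211479/neu-kallm | server/utils/wikitable/wikitable_parser.py | clear_br_for_table
-- ===== SOURCE A (Python) =====
-- def clear_br_for_table(columns, rows):
--     index = []
--     for i, row in enumerate(rows):
--         for j, cell in enumerate(row):
--             if '\n' in cell:
--                 index.append(j)
--     for i in sorted(index, reverse=True):
--         del columns[i]
--         for j, row in enumerate(rows):
--             del rows[j][i]
--     return columns, rows
-- ===== SOURCE B (Python) =====
-- def clear_br_for_table(columns, rows):
--     bad = set()
--     for row in rows:
--         for j, cell in enumerate(row):
--             if '\n' in cell: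
--                 bad.add(j)
--     new_columns = [c for j, c in enumerate(columns) if j not in bad]
--     new_rows = [[c for j, c in enumerate(row) if j not in bad] for row in rows]
--     return new_columns, new_rows
-- ===== Notes on version B (the rewrite author's own statement) =====
-- stated objective: simpler
-- what changed: A records a column index once per newline cell and repeatedly deletes that position from the column list and from every row (reverse-sorted, in place); B collects the set of newline columns once and rebuilds columns and rows in a single filtering pass; B builds new lists instead of mutating the arguments (return values are equal).
-- intended difference: On tables where some column contains newline cells in two or more rows, A deletes that column's position once per such cell, so after the first deletion the later deletions cascade onto innocent neighbouring columns and A drops extra columns; B deletes each newline column exactly once, which is the intended behaviour of removing the columns that contain newlines. — e.g. on clear_br_for_table(["a", "b"], [["x\n", "p"], ["y\n", "q"]]): A returns ([], [[], []]), B returns (["b"], [["p"], ["q"]])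
import Mathlib
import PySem

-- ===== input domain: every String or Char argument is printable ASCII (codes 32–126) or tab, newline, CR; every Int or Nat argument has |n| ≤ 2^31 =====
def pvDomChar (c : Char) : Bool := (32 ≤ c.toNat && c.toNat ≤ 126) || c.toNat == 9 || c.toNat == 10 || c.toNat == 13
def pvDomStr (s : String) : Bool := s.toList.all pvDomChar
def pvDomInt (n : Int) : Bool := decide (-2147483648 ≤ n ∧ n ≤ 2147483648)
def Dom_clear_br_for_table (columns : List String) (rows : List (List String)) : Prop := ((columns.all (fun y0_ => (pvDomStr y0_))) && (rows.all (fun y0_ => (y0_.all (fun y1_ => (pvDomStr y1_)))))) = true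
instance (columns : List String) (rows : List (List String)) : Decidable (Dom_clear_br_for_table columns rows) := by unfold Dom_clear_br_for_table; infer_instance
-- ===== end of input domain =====

-- B computes the set of newline-containing column indices once and rebuilds columns and rows in
-- one filtering pass, instead of A's repeated in-place `del` per recorded newline cell. Equality
-- is of RETURN values only: A also mutates its arguments in place, B does not.

-- ===== PORT A =====
-- '\n' in cell
def pvHasNl (cell : String) : Bool := PySem.Str.isIn "\n" cell

-- index = []; for i, row in enumerate(rows): for j, cell in enumerate(row): if '\n' in cell: index.append(j)
def pvIdxA (rows : List (List String)) : List Nat :=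
  rows.foldl (fun acc row =>
    row.zipIdx.foldl (fun acc2 p => if pvHasNl p.1 then acc2 ++ [p.2] else acc2) acc) []

-- sorted(index, reverse=True)
def pvOccSorted (rows : List (List String)) : List Nat :=
  PySem.List.sorted (pvIdxA rows) (fun x => x) true

-- `del xs[i]`: exact for i < xs.length; Python raises IndexError otherwise (those runs are excluded by Pre_)
def pvDel {α : Type} (xs : List α) (i : Nat) : List α := xs.take i ++ xs.drop (i + 1)

def clear_br_for_table (columns : List String) (rows : List (List String)) :
    List String × List (List String) :=
  (pvOccSorted rows).foldl
    (fun st i => (pvDel st.1 i, st.2.map (fun r => pvDel r i))) (columns, rows)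

-- ===== PORT B =====
-- bad = set(); for row in rows: for j, cell in enumerate(row): if '\n' in cell: bad.add(j)
def pvBad (rows : List (List String)) : PySem.Set Nat :=
  rows.foldl (fun s row =>
    row.zipIdx.foldl (fun s2 p => if pvHasNl p.1 then PySem.Set.add s2 p.2 else s2) s)
    PySem.Set.empty

-- [c for j, c in enumerate(xs) if j not in bad]
def pvEnumKeep {α : Type} (bad : PySem.Set Nat) (xs : List α) : List α :=
  (xs.zipIdx.filter (fun p => !(PySem.Set.contains bad p.2))).map (fun p => p.1)

def clear_br_for_table_alt (columns : List String) (rows : List (List String)) :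
    List String × List (List String) :=
  let bad := pvBad rows
  (pvEnumKeep bad columns, rows.map (fun r => pvEnumKeep bad r))

-- ===== PRECONDITION & SPEC =====
-- the deletion-index list A records, row-major (proof helper; used by D_ below)
def pvOcc (rows : List (List String)) : List Nat :=
  rows.flatMap (fun row =>
    ((row.zipIdx.filter (fun p => PySem.Str.isIn "\n" p.1)).map (fun p => p.2)))

-- Pre_ excludes exactly the inputs on which A raises IndexError: the t-th largest recorded deletion
-- index (duplicates kept, as A records them) must be in range of the then-already-t-times-shortened lists.
def Pre_clear_br_for_table (columns : List String) (rows : List (List String)) : Prop :=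
  ∀ p ∈ (pvOccSorted rows).zipIdx,
    p.1 + p.2 < columns.length ∧ ∀ r ∈ rows, p.1 + p.2 < r.length
instance (columns : List String) (rows : List (List String)) : Decidable (Pre_clear_br_for_table columns rows) := by unfold Pre_clear_br_for_table; infer_instance

def pvWitness_clear_br_for_table : List String × List (List String) :=
  (["a", "b"], [["x", "y\n"]])

-- On tables where some column contains newline cells in two or more rows, A deletes that column's
-- position once per such cell, so after the first deletion the later deletions cascade onto
-- innocent neighbouring columns and A drops extra columns; B deletes each newline column exactly
-- once, which is the intended behaviour of removing the columns that contain newlines.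
def D_clear_br_for_table (columns : List String) (rows : List (List String)) : Prop :=
  ¬ (pvOcc rows).Nodup
instance (columns : List String) (rows : List (List String)) : Decidable (D_clear_br_for_table columns rows) := by unfold D_clear_br_for_table; infer_instance

def Spec_clear_br_for_table (columns : List String) (rows : List (List String)) (out : List String × List (List String)) : Prop := ¬ D_clear_br_for_table columns rows → out = clear_br_for_table_alt columns rows
instance (columns : List String) (rows : List (List String)) (out : List String × List (List String)) : Decidable (Spec_clear_br_for_table columns rows out) := by unfold Spec_clear_br_for_table; infer_instance

def pvDiffWitness_clear_br_for_table : List String × List (List String) :=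
  (["a", "b"], [["x\n", "p"], ["y\n", "q"]])

def pvDiffWitnessOut_clear_br_for_table :
    (List String × List (List String)) × (List String × List (List String)) :=
  (([], [[], []]), (["b"], [["p"], ["q"]]))

-- ===== CLAIM (what is proved, stated in full; the proofs are below) =====
def Claim_unchanged_clear_br_for_table : Prop := ∀ (columns : List String) (rows : List (List String)), Dom_clear_br_for_table columns rows → Pre_clear_br_for_table columns rows → Spec_clear_br_for_table columns rows (clear_br_for_table columns rows)
def Claim_changed_clear_br_for_table : Prop := Dom_clear_br_for_table (pvDiffWitness_clear_br_for_table.1) (pvDiffWitness_clear_br_for_table.2) ∧ Pre_clear_br_for_table (pvDiffWitness_clear_br_for_table.1) (pvDiffWitness_clear_br_for_table.2) ∧ D_clear_br_for_table (pvDiffWitness_clear_br_for_table.1) (pvDiffWitness_clear_br_for_table.2) ∧ clear_br_for_table (pvDiffWitness_clear_br_for_table.1) (pvDiffWitness_clear_br_for_table.2) = pvDiffWitnessOut_clear_br_for_table.1 ∧ clear_br_for_table_alt (pvDiffWitness_clear_br_for_table.1) (pvDiffWitness_clear_br_for_table.2) = pvDiffWitnessOut_clear_br_for_table.2 ∧ pvDiffWitnessOut_clear_br_for_table.1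 ≠ pvDiffWitnessOut_clear_br_for_table.2
def Claim_exact_clear_br_for_table : Prop := ∀ (columns : List String) (rows : List (List String)), Dom_clear_br_for_table columns rows → Pre_clear_br_for_table columns rows → D_clear_br_for_table columns rows → clear_br_for_table columns rows ≠ clear_br_for_table_alt columns rows

-- ===== LEMMAS AND PROOFS =====

-- count of occurrences of column o in a deletion-index list
def pvCnt (I : List Nat) (o : Nat) : Nat := I.count o

-- pending demand left over just before position o of the keep/drop scan
def pvPend (c : Nat → Nat) : Nat → Nat
  | 0 => 0
  | o + 1 => pvPend c o + c o - 1

-- keep/drop decision at position o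
def pvKeepF (c : Nat → Nat) (o : Nat) : Bool := pvPend c o + c o == 0

-- filter a list by positions (starting at o) the mask keeps
def pvFilt {α : Type} (f : Nat → Bool) : Nat → List α → List α
  | _, [] => []
  | o, x :: xs => if f o then x :: pvFilt f (o + 1) xs else pvFilt f (o + 1) xs

theorem pvFilt_congr {α : Type} (c1 c2 : Nat → Nat) (xs : List α) :
    ∀ o, pvPend c1 o = pvPend c2 o → (∀ u, o ≤ u → c1 u = c2 u) →
    pvFilt (pvKeepF c1) o xs = pvFilt (pvKeepF c2) o xs := by
  induction xs with
  | nil => intro o _ _; rfl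
  | cons x xs ih =>
      intro o hp hc
      have hk : pvKeepF c1 o = pvKeepF c2 o := by
        simp only [pvKeepF, hp, hc o le_rfl]
      have hp' : pvPend c1 (o + 1) = pvPend c2 (o + 1) := by
        simp only [pvPend, hp, hc o le_rfl]
      have := ih (o + 1) hp' (fun u hu => hc u (by omega))
      simp only [pvFilt, hk, this]

theorem pvPend_zero (c : Nat → Nat) (o : Nat) (h : ∀ u, u < o → c u = 0) :
    pvPend c o = 0 := by
  induction o with
  | zero => rfl
  | succ o ih =>
      simp only [pvPend, ih (fun u hu => h u (by omega)), h o (by omega)]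

theorem pvFilt_split {α : Type} (f : Nat → Bool) :
    ∀ (k s : Nat) (xs : List α), (∀ o, s ≤ o → o < s + k → f o = true) →
    pvFilt f s xs = xs.take k ++ pvFilt f (s + k) (xs.drop k) := by
  intro k
  induction k with
  | zero => intro s xs _; simp
  | succ k ih =>
      intro s xs h
      cases xs with
      | nil => simp [pvFilt]
      | cons x xs =>
          have hs : f s = true := h s le_rfl (by omega)
          have := ih (s + 1) xs (fun o h1 h2 => h o (by omega) (by omega))
          simp only [pvFilt, hs, if_true, this, List.take_succ_cons, List.drop_succ_cons,
            List.cons_append]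
          have : s + 1 + k = s + (k + 1) := by omega
          rw [this]

theorem pvFilt_tail {α : Type} (c1 c2 : Nat → Nat) (xs : List α) :
    ∀ o, pvPend c2 o + c2 o = pvPend c1 o + c1 o + 1 → (∀ u, o < u → c2 u = c1 u) →
    pvFilt (pvKeepF c2) o xs = (pvFilt (pvKeepF c1) o xs).tail := by
  induction xs with
  | nil => intro o _ _; rfl
  | cons x xs ih =>
      intro o hq hc
      by_cases h1 : pvPend c1 o + c1 o = 0
      · have hk1 : pvKeepF c1 o = true := by simp [pvKeepF, h1]
        have hk2 : pvKeepF c2 o = false := by simp [pvKeepF]; omega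
        have hcong := pvFilt_congr c2 c1 xs (o + 1)
          (by simp only [pvPend]; omega) (fun u hu => hc u (by omega))
        simp [pvFilt, hk1, hk2, hcong]
      · have hk1 : pvKeepF c1 o = false := by simp [pvKeepF]; omega
        have hk2 : pvKeepF c2 o = false := by simp [pvKeepF]; omega
        have := ih (o + 1) (by simp only [pvPend]; rw [hc (o + 1) (by omega)]; omega)
          (fun u hu => hc u (by omega))
        simp [pvFilt, hk1, hk2, this]

theorem pvFilt_all_true {α : Type} (f : Nat → Bool) (xs : List α) :
    ∀ s, (∀ o, s ≤ o → f o = true) → pvFilt f s xs = xs := by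
  induction xs with
  | nil => intro s _; rfl
  | cons x xs ih =>
      intro s h
      simp only [pvFilt, h s le_rfl, if_true, ih (s + 1) (fun o ho => h o (by omega))]

theorem pvDelFold {α : Type} (I : List Nat) (xs : List α)
    (hI : I.Pairwise (fun a b => b ≤ a)) (hb : ∀ u ∈ I, u ≤ xs.length) :
    I.foldl pvDel xs = pvFilt (pvKeepF (pvCnt I)) 0 xs := by
  induction I using List.reverseRecOn with
  | nil =>
      simp only [List.foldl_nil]
      refine (pvFilt_all_true _ xs 0 ?_).symm
      intro o _
      simp [pvKeepF, pvCnt, pvPend_zero (pvCnt []) o (by intro u _; simp [pvCnt])]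
  | append_singleton J v ih =>
      rw [List.pairwise_append] at hI
      obtain ⟨hJ, _, hge⟩ := hI
      have hge' : ∀ a ∈ J, v ≤ a := fun a ha => hge a ha v (by simp)
      have hbJ : ∀ u ∈ J, u ≤ xs.length := fun u hu => hb u (by simp [hu])
      have hvlen : v ≤ xs.length := hb v (by simp)
      have hcJ0 : ∀ u, u < v → pvCnt J u = 0 := by
        intro u hu
        simp only [pvCnt, List.count_eq_zero]
        intro hmem
        exact absurd (hge' u hmem) (by omega)
      have hcI : ∀ u, pvCnt (J ++ [v]) u = pvCnt J u + (if u = v then 1 else 0) := by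
        intro u
        simp only [pvCnt, List.count_append, List.count_singleton]
        by_cases h : u = v
        · simp [h]
        · simp [h, Ne.symm h]
      have hcI0 : ∀ u, u < v → pvCnt (J ++ [v]) u = 0 := by
        intro u hu; rw [hcI]; simp [hcJ0 u hu]; omega
      have hkJ : ∀ o, o < v → pvKeepF (pvCnt J) o = true := by
        intro o ho
        simp [pvKeepF, pvPend_zero (pvCnt J) o (fun u hu => hcJ0 u (by omega)),
          hcJ0 o ho]
      have hkI : ∀ o, o < v → pvKeepF (pvCnt (J ++ [v])) o = true := by
        intro o ho
        simp [pvKeepF, pvPend_zero (pvCnt (J ++ [v])) o (fun u hu => hcI0 u (by omega)),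
          hcI0 o ho]
      have hlen : (xs.take v).length = v := by simp [hvlen]
      calc (J ++ [v]).foldl pvDel xs
          = pvDel (J.foldl pvDel xs) v := by rw [List.foldl_append]; rfl
        _ = pvDel (pvFilt (pvKeepF (pvCnt J)) 0 xs) v := by rw [ih hJ hbJ]
        _ = pvDel (xs.take v ++ pvFilt (pvKeepF (pvCnt J)) v (xs.drop v)) v := by
              rw [pvFilt_split (pvKeepF (pvCnt J)) v 0 xs
                (fun o _ ho => hkJ o (by omega))]
              simp
        _ = xs.take v ++ (pvFilt (pvKeepF (pvCnt J)) v (xs.drop v)).tail := by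
              unfold pvDel
              rw [List.take_left' hlen, show v + 1 = v + 1 from rfl, ← List.drop_drop,
                List.drop_left' hlen, List.drop_one]
        _ = xs.take v ++ pvFilt (pvKeepF (pvCnt (J ++ [v]))) v (xs.drop v) := by
              congr 1
              refine (pvFilt_tail (pvCnt J) (pvCnt (J ++ [v])) (xs.drop v) v ?_ ?_).symm
              · rw [pvPend_zero (pvCnt J) v hcJ0,
                  pvPend_zero (pvCnt (J ++ [v])) v hcI0, hcI v]
                simp
              · intro u hu; rw [hcI u]; simp; omega
        _ = pvFilt (pvKeepF (pvCnt (J ++ [v]))) 0 xs := by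
              rw [pvFilt_split (pvKeepF (pvCnt (J ++ [v]))) v 0 xs
                (fun o _ ho => hkI o (by omega))]
              simp

theorem pvIdxA_eq (rows : List (List String)) :
    ∀ acc, rows.foldl (fun acc row =>
        row.zipIdx.foldl (fun acc2 p => if pvHasNl p.1 then acc2 ++ [p.2] else acc2) acc) acc
      = acc ++ pvOcc rows := by
  intro acc
  have hstep : ∀ (acc2 : List Nat) (row : List String),
      row.zipIdx.foldl (fun acc2 p => if pvHasNl p.1 then acc2 ++ [p.2] else acc2) acc2
        = acc2 ++ ((row.zipIdx.filter (fun p => pvHasNl p.1)).map (fun p => p.2)) := by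
    intro acc2 row
    exact PySem.List.foldl_append_if (fun p : String × Nat => pvHasNl p.1)
      (fun p : String × Nat => p.2) row.zipIdx acc2
  calc rows.foldl (fun acc row =>
        row.zipIdx.foldl (fun acc2 p => if pvHasNl p.1 then acc2 ++ [p.2] else acc2) acc) acc
      = rows.foldl (fun acc row =>
          acc ++ ((row.zipIdx.filter (fun p => pvHasNl p.1)).map (fun p => p.2))) acc := by
        exact PySem.List.foldl_congr_mem rows _ _ acc (fun a row _ => hstep a row)
    _ = acc ++ pvOcc rows := PySem.List.foldl_append_eq_flatMap _ rows acc

theorem pvMapFold (I : List Nat) :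
    ∀ (rows : List (List String)),
    I.foldl (fun rs i => rs.map (fun r => pvDel r i)) rows
      = rows.map (fun r => I.foldl pvDel r) := by
  induction I with
  | nil => intro rows; simp
  | cons i I ih =>
      intro rows
      simp only [List.foldl_cons, ih, List.map_map]
      rfl

theorem pvMemBound (I : List Nat) (n : Nat)
    (h : ∀ p ∈ I.zipIdx, p.1 + p.2 < n) : ∀ u ∈ I, u ≤ n := by
  intro u hu
  obtain ⟨i, hi, rfl⟩ := List.mem_iff_getElem.mp hu
  have : (I[i], i) ∈ I.zipIdx := by
    simpa using List.mem_zipIdx_iff_getElem?.mpr (by simp [hi])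
  have := h _ this
  omega

-- membership in the set B builds = membership in the occurrence list A records
theorem pvBad_mem (rows : List (List String)) :
    ∀ (s : PySem.Set Nat) (y : Nat),
    (y ∈ rows.foldl (fun s row =>
        row.zipIdx.foldl (fun s2 p => if pvHasNl p.1 then PySem.Set.add s2 p.2 else s2) s) s)
      ↔ y ∈ s ∨ y ∈ pvOcc rows := by
  have hrow : ∀ (row : List String) (s : PySem.Set Nat) (y : Nat),
      (y ∈ row.zipIdx.foldl (fun s2 p => if pvHasNl p.1 then PySem.Set.add s2 p.2 else s2) s)
        ↔ y ∈ s ∨ y ∈ ((row.zipIdx.filter (fun p => pvHasNl p.1)).map (fun p => p.2)) := by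
    intro row
    induction row.zipIdx with
    | nil => intro s y; simp
    | cons p l ih =>
        intro s y
        by_cases hp : pvHasNl p.1
        · simp only [List.foldl_cons, hp, if_true, ih, List.filter_cons, List.map_cons,
            PySem.Set.mem_add]
          simp [hp]
          tauto
        · simp only [List.foldl_cons, hp, if_false, ih, List.filter_cons]
          simp [hp]
  induction rows with
  | nil => intro s y; simp [pvOcc]
  | cons row rows ih =>
      intro s y
      simp only [List.foldl_cons, ih, hrow row s y, pvOcc, List.flatMap_cons,
        List.mem_append]
      tauto

-- B's enumerate-filter comprehension is a positional filter
theorem pvEnumKeep_eq {α : Type} (f : Nat → Bool) (xs : List α) :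
    ∀ s, ((xs.zipIdx s).filter (fun p => f p.2)).map (fun p => p.1) = pvFilt f s xs := by
  induction xs with
  | nil => intro s; rfl
  | cons x xs ih =>
      intro s
      by_cases hf : f s
      · simp only [List.zipIdx_cons, List.filter_cons, hf, List.map_cons, pvFilt, if_true]
        rw [ih (s + 1)]
      · simp only [List.zipIdx_cons, List.filter_cons, hf, pvFilt]
        simp only [Bool.false_eq_true, if_false, ih (s + 1)]

-- length of a positional filter: how many positions in range are kept
theorem pvFilt_length {α : Type} (f : Nat → Bool) (xs : List α) :
    ∀ s, (pvFilt f s xs).length = ((List.range' s xs.length).filter f).length := by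
  induction xs with
  | nil => intro s; rfl
  | cons x xs ih =>
      intro s
      simp only [List.length_cons, List.range'_succ, List.filter_cons]
      by_cases hf : f s <;> simp [pvFilt, hf, ih (s + 1)]

-- each deletion shortens the list by one while the indices stay in range
theorem pvDelFold_length {α : Type} (I : List Nat) :
    ∀ (xs : List α) (t : Nat), (∀ p ∈ I.zipIdx t, p.1 + p.2 < xs.length + t) →
    (I.foldl pvDel xs).length + I.length = xs.length := by
  induction I with
  | nil => intro xs t _; simp
  | cons i I ih =>
      intro xs t h
      have hi : i + t < xs.length + t := h (i, t) (by simp [List.zipIdx_cons])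
      have hilen : i < xs.length := by omega
      have hdel : (pvDel xs i).length = xs.length - 1 := by
        unfold pvDel
        simp [List.length_take, List.length_drop]
        omega
      have hrec := ih (pvDel xs i) (t + 1) (by
        intro p hp
        have := h p (by simp [List.zipIdx_cons, hp])
        omega)
      rw [hdel] at hrec
      simp only [List.foldl_cons, List.length_cons]
      omega


-- strict bound: every recorded index is below the untouched length
theorem pvMemBoundLt (I : List Nat) (n : Nat)
    (h : ∀ p ∈ I.zipIdx, p.1 + p.2 < n) : ∀ u ∈ I, u < n := by
  intro u hu
  obtain ⟨i, hi, rfl⟩ := List.mem_iff_getElem.mp hu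
  have : (I[i], i) ∈ I.zipIdx := by
    simpa using List.mem_zipIdx_iff_getElem?.mpr (by simp [hi])
  have := h _ this
  omega

-- ===== VERDICT (by name: the statement is the Claim_ definition above) =====
theorem clear_br_for_table_spec : Claim_unchanged_clear_br_for_table := by
  intro columns rows _ hpre
  unfold Spec_clear_br_for_table D_clear_br_for_table
  intro hD
  have hnodup : (pvOcc rows).Nodup := not_not.mp hD
  unfold clear_br_for_table clear_br_for_table_alt
  set I := pvOccSorted rows with hIdef
  have hsort : I.Pairwise (fun a b => b ≤ a) :=
    PySem.List.sorted_pairwise_rev (pvIdxA rows) (fun x => x)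
  have hIperm : I.Perm (pvIdxA rows) := PySem.List.sorted_perm (pvIdxA rows) (fun x => x) true
  have hIdx : pvIdxA rows = pvOcc rows := by
    unfold pvIdxA; simpa using pvIdxA_eq rows []
  set c := pvCnt I with hcdef
  have hcount : ∀ o, c o = (pvOcc rows).count o := by
    intro o; rw [hcdef]; unfold pvCnt; rw [hIperm.count_eq, hIdx]
  have hcle : ∀ o, c o ≤ 1 := by
    intro o; rw [hcount o]; exact List.nodup_iff_count_le_one.mp hnodup o
  have hpend : ∀ o, pvPend c o = 0 := by
    intro o
    induction o with
    | zero => rfl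
    | succ o ih =>
        simp only [pvPend, ih]
        have := hcle o; omega
  have hmemBad : ∀ o : Nat, o ∈ pvBad rows ↔ o ∈ pvOcc rows := by
    intro o
    unfold pvBad
    rw [pvBad_mem rows PySem.Set.empty o]
    simp [PySem.Set.empty]
  have hkeq : pvKeepF c = fun o => !(PySem.Set.contains (pvBad rows) o) := by
    funext o
    simp only [pvKeepF, hpend o, Nat.zero_add]
    by_cases ho : o ∈ pvOcc rows
    · have hne : c o ≠ 0 := by
        rw [hcount o]
        have := List.count_pos_iff.mpr ho
        omega
      simp [hne, hmemBad, ho]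
    · have hz : c o = 0 := by
        rw [hcount o]
        exact List.count_eq_zero.mpr ho
      simp [hz, hmemBad, ho]
  have hpf : ∀ (xs : List String), pvFilt (pvKeepF c) 0 xs = pvEnumKeep (pvBad rows) xs := by
    intro xs
    rw [hkeq]
    exact (pvEnumKeep_eq (fun o => !(PySem.Set.contains (pvBad rows) o)) xs 0).symm
  rw [PySem.List.foldl_prod_mk pvDel (fun rs i => rs.map (fun r => pvDel r i)) I columns rows,
    pvMapFold I rows]
  have hcols : I.foldl pvDel columns = pvFilt (pvKeepF c) 0 columns :=
    pvDelFold I columns hsort (pvMemBound I columns.length (fun p hp => (hpre p hp).1))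
  have hrows : ∀ r ∈ rows, I.foldl pvDel r = pvFilt (pvKeepF c) 0 r := fun r hr =>
    pvDelFold I r hsort (pvMemBound I r.length (fun p hp => (hpre p hp).2 r hr))
  simp only
  rw [hcols, hpf columns]
  congr 1
  exact List.map_congr_left (fun r hr => by rw [hrows r hr, hpf r])

theorem clear_br_for_table_changed : Claim_changed_clear_br_for_table := by
  unfold Claim_changed_clear_br_for_table; decide

theorem clear_br_for_table_tight : Claim_exact_clear_br_for_table := by
  intro columns rows _ hpre hD hEq
  unfold D_clear_br_for_table at hD
  set I := pvOccSorted rows with hIdef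
  set n := columns.length with hndef
  have hIperm : I.Perm (pvIdxA rows) := PySem.List.sorted_perm (pvIdxA rows) (fun x => x) true
  have hIdx : pvIdxA rows = pvOcc rows := by
    unfold pvIdxA; simpa using pvIdxA_eq rows []
  have hIocc : I.Perm (pvOcc rows) := hIdx ▸ hIperm
  -- length of A's first component
  have hlenA : (I.foldl pvDel columns).length + I.length = n := by
    refine pvDelFold_length I columns 0 ?_
    intro p hp
    have := (hpre p hp).1
    omega
  have hA1 : (clear_br_for_table columns rows).1 = I.foldl pvDel columns := by
    unfold clear_br_for_table
    rw [PySem.List.foldl_prod_mk pvDel (fun rs i => rs.map (fun r => pvDel r i)) I columns rows]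
  -- length of B's first component
  have hB1 : (clear_br_for_table_alt columns rows).1 = pvEnumKeep (pvBad rows) columns := rfl
  have hmemBad : ∀ o : Nat, o ∈ pvBad rows ↔ o ∈ pvOcc rows := by
    intro o
    unfold pvBad
    rw [pvBad_mem rows PySem.Set.empty o]
    simp [PySem.Set.empty]
  have hlt : ∀ u ∈ pvOcc rows, u < n := by
    intro u hu
    exact pvMemBoundLt I n (fun p hp => (hpre p hp).1) u (hIocc.mem_iff.mpr hu)
  set f : Nat → Bool := fun o => !(PySem.Set.contains (pvBad rows) o) with hfdef
  have hBfilt : pvEnumKeep (pvBad rows) columns = pvFilt f 0 columns :=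
    pvEnumKeep_eq f columns 0
  have hBlen : (pvFilt f 0 columns).length = ((List.range n).filter f).length := by
    rw [pvFilt_length f columns 0, List.range_eq_range']
  -- kept + dropped positions partition range n
  have hsplit : ((List.range n).filter f).length + ((List.range n).filter (fun o => PySem.Set.contains (pvBad rows) o)).length = n := by
    have h := List.length_eq_length_filter_add (l := List.range n)
      (fun o => PySem.Set.contains (pvBad rows) o)
    rw [List.length_range] at h
    have hff : ((List.range n).filter (fun o => !(PySem.Set.contains (pvBad rows) o))).length
        = ((List.range n).filter f).length := rfl
    rw [← hff]
    omega
  -- the dropped positions are exactly the distinct recorded indices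
  have hdropped : ((List.range n).filter (fun o => PySem.Set.contains (pvBad rows) o)).length = (pvOcc rows).dedup.length := by
    have hperm : ((List.range n).filter (fun o => PySem.Set.contains (pvBad rows) o)).Perm (pvOcc rows).dedup := by
      rw [List.perm_ext_iff_of_nodup (List.Nodup.filter _ (List.nodup_range)) (List.nodup_dedup _)]
      intro a
      simp only [List.mem_filter, List.mem_range, List.mem_dedup, PySem.Set.contains_iff]
      constructor
      · rintro ⟨_, h⟩; exact (hmemBad a).mp h
      · intro h; exact ⟨hlt a h, (hmemBad a).mpr h⟩
    exact hperm.length_eq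
  have hdedlt : (pvOcc rows).dedup.length < (pvOcc rows).length := by
    have hsub : (pvOcc rows).dedup.Sublist (pvOcc rows) := List.dedup_sublist _
    have hle : (pvOcc rows).dedup.length ≤ (pvOcc rows).length := hsub.length_le
    rcases lt_or_eq_of_le hle with h | h
    · exact h
    · exact absurd ((hsub.eq_of_length h) ▸ List.nodup_dedup (pvOcc rows)) hD
  have hIlen : I.length = (pvOcc rows).length := hIocc.length_eq
  -- the two first components have different lengths
  have hEq1 : (clear_br_for_table columns rows).1.length = (clear_br_for_table_alt columns rows).1.length := by
    rw [hEq]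
  rw [hA1, hB1, hBfilt, hBlen] at hEq1
  omega
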